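-- pv_equiv track=rewrite | github.com/actonbp/KSAO_WFD | archive/old_scripts/domain_enhanced_viz.py | assign_cluster_titles
-- ===== SOURCE A (Python) =====
-- def assign_cluster_titles(cluster_keywords):
--     """Assign descriptive titles to clusters based on keywords."""
--     cluster_titles = {}
--
--     for cluster, keywords in cluster_keywords.items():
--         # Get top 4 keywords
--         top_words = [word for word, _ in keywords[:4]]
--
--         # Map these to a descriptive title based on domain knowledge
--         if any(word in ["substance", "addiction", "disorder", "use"] for word in top_words):
--             title = "Substance Use Terminology & Concepts"
--         elif any(word in ["brain", "neuron", "neurotransmitter", "dopamine"] for word in top_words):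
--             title = "Neurobiology of Addiction"
--         elif any(word in ["reward", "circuit", "pleasure", "surge"] for word in top_words):
--             title = "Brain Reward Pathways"
--         elif any(word in ["term", "language", "negative", "stigma"] for word in top_words):
--             title = "Person-First Language & Terminology"
--         elif any(word in ["risk", "factor", "trauma", "childhood"] for word in top_words):
--             title = "Risk Factors & Development"
--         elif any(word in ["stage", "continuum", "harmful", "problem"] for word in top_words):
--             title = "Substance Use Continuum & Stages"
--         elif any(word in ["treatment", "recovery", "therapy", "counseling"] for word in top_words):
--             title = "Treatment & Recovery Approaches"
--         else:
--             # Default to using the keywords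
--             title = f"Topic: {', '.join(top_words[:3])}"
--
--         cluster_titles[cluster] = title
--
--     return cluster_titles
-- ===== SOURCE B (Python) =====
-- # Inverted index: keyword -> (priority, title); per cluster take the minimum-priority hit.
-- _KEYWORD_INDEX = {}
-- for _i, (_words, _title) in enumerate([
--     (["substance", "addiction", "disorder", "use"], "Substance Use Terminology & Concepts"),
--     (["brain", "neuron", "neurotransmitter", "dopamine"], "Neurobiology of Addiction"),
--     (["reward", "circuit", "pleasure", "surge"], "Brain Reward Pathways"),
--     (["term", "language", "negative", "stigma"], "Person-First Language & Terminology"),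
--     (["risk", "factor", "trauma", "childhood"], "Risk Factors & Development"),
--     (["stage", "continuum", "harmful", "problem"], "Substance Use Continuum & Stages"),
--     (["treatment", "recovery", "therapy", "counseling"], "Treatment & Recovery Approaches"),
-- ]):
--     for _w in _words:
--         _KEYWORD_INDEX[_w] = (_i, _title)
--
--
-- def assign_cluster_titles(cluster_keywords):
--     """Assign descriptive titles to clusters based on keywords (inverted-index version)."""
--     cluster_titles = {}
--     for cluster, keywords in cluster_keywords.items():
--         top_words = [word for word, _ in keywords[:4]]
--         best = None
--         for w in top_words:
--             hit = _KEYWORD_INDEX.get(w)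
--             if hit is not None and (best is None or hit[0] < best[0]):
--                 best = hit
--         if best is not None:
--             cluster_titles[cluster] = best[1]
--         else:
--             cluster_titles[cluster] = "Topic: " + ", ".join(top_words[:3])
--     return cluster_titles
-- ===== Notes on version B (the rewrite author's own statement) =====
-- stated objective: alternative
-- what changed: Replaces the seven-branch elif chain (scan rules, test each rule's keywords against the words) by an inverted keyword->(priority,title) dict built once; each cluster scans its top words and keeps the minimum-priority hit, so no rule list is scanned per cluster.
import Mathlib
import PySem

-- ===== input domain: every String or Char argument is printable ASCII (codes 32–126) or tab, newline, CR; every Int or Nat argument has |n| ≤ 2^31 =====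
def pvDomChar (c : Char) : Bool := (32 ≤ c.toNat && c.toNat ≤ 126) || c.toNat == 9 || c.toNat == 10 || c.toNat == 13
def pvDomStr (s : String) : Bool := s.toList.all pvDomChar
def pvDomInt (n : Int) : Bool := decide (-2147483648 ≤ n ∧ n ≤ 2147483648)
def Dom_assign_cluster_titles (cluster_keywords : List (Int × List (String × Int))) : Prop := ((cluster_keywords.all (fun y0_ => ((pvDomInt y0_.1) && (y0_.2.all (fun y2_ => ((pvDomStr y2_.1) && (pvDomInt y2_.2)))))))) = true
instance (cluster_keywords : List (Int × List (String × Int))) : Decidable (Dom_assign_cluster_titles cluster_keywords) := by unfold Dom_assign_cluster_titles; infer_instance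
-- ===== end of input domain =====

-- B replaces A's seven-branch elif chain by an inverted keyword->(priority,title) index
-- built once; each cluster scans its words keeping the minimum-priority hit; objective: alternative.


-- ===== PORT A =====
-- literal transliteration of A: the dict loop with the elif chain.
-- keywords[:4] / top_words[:3] have nonnegative literal bounds, so List.take is exact.
def assign_cluster_titles (cluster_keywords : List (Int × List (String × Int))) : List (Int × String) :=
  (cluster_keywords.foldl
    (fun (cluster_titles : PySem.Dict Int String) kv =>
      let top_words := (kv.2.take 4).map Prod.fst
      let title :=
        if top_words.any (fun word => (["substance", "addiction", "disorder", "use"] : List String).contains word) then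
          "Substance Use Terminology & Concepts"
        else if top_words.any (fun word => (["brain", "neuron", "neurotransmitter", "dopamine"] : List String).contains word) then
          "Neurobiology of Addiction"
        else if top_words.any (fun word => (["reward", "circuit", "pleasure", "surge"] : List String).contains word) then
          "Brain Reward Pathways"
        else if top_words.any (fun word => (["term", "language", "negative", "stigma"] : List String).contains word) then
          "Person-First Language & Terminology"
        else if top_words.any (fun word => (["risk", "factor", "trauma", "childhood"] : List String).contains word) then
          "Risk Factors & Development"
        else if top_words.any (fun word => (["stage", "continuum", "harmful", "problem"] : List String).contains word) then
          "Substance Use Continuum & Stages"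
        else if top_words.any (fun word => (["treatment", "recovery", "therapy", "counseling"] : List String).contains word) then
          "Treatment & Recovery Approaches"
        else
          "Topic: " ++ PySem.Str.join ", " (top_words.take 3)
      cluster_titles.insert kv.1 title)
    PySem.Dict.empty).items

-- ===== PORT B =====
-- the rule table Source B's module-level loop reads
def pvRulesB : List (List String × String) :=
  [ (["substance", "addiction", "disorder", "use"], "Substance Use Terminology & Concepts"),
    (["brain", "neuron", "neurotransmitter", "dopamine"], "Neurobiology of Addiction"),
    (["reward", "circuit", "pleasure", "surge"], "Brain Reward Pathways"),
    (["term", "language", "negative", "stigma"], "Person-First Language & Terminology"),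
    (["risk", "factor", "trauma", "childhood"], "Risk Factors & Development"),
    (["stage", "continuum", "harmful", "problem"], "Substance Use Continuum & Stages"),
    (["treatment", "recovery", "therapy", "counseling"], "Treatment & Recovery Approaches") ]

-- _KEYWORD_INDEX: the module-level double loop building the dict keyword -> (priority, title)
def pvKeywordIndex : PySem.Dict String (Int × String) :=
  (PySem.List.enumerate pvRulesB).foldl
    (fun d p => p.2.1.foldl (fun d w => d.insert w (p.1, p.2.2)) d)
    PySem.Dict.empty

-- the body of Source B's inner loop over top_words
def pvBestStep (best : Option (Int × String)) (w : String) : Option (Int × String) :=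
  match pvKeywordIndex.get? w with
  | none => best
  | some hit =>
    match best with
    | none => some hit
    | some b => if hit.1 < b.1 then some hit else some b

-- literal transliteration of Source B: per cluster, fold the min-priority hit over top_words.
def assign_cluster_titles_alt (cluster_keywords : List (Int × List (String × Int))) : List (Int × String) :=
  (cluster_keywords.foldl
    (fun (cluster_titles : PySem.Dict Int String) kv =>
      let top_words := (kv.2.take 4).map Prod.fst
      match top_words.foldl pvBestStep none with
      | some best => cluster_titles.insert kv.1 best.2
      | none => cluster_titles.insert kv.1 ("Topic: " ++ PySem.Str.join ", " (top_words.take 3)))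
    PySem.Dict.empty).items

-- ===== PRECONDITION & SPEC =====
def Spec_assign_cluster_titles (cluster_keywords : List (Int × List (String × Int))) (out : List (Int × String)) : Prop := out = assign_cluster_titles_alt cluster_keywords
instance (cluster_keywords : List (Int × List (String × Int))) (out : List (Int × String)) : Decidable (Spec_assign_cluster_titles cluster_keywords out) := by unfold Spec_assign_cluster_titles; infer_instance

-- ===== CLAIM (what is proved, stated in full; the proofs are below) =====
def Claim_equal_assign_cluster_titles : Prop := ∀ (cluster_keywords : List (Int × List (String × Int))), Dom_assign_cluster_titles cluster_keywords → Spec_assign_cluster_titles cluster_keywords (assign_cluster_titles cluster_keywords)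

-- ===== LEMMAS AND PROOFS =====

-- proof helpers: the elif chain as first-match over an indexed rule list
def pvRulesIdx : List (Int × List String × String) :=
  [ (0, ["substance", "addiction", "disorder", "use"], "Substance Use Terminology & Concepts"),
    (1, ["brain", "neuron", "neurotransmitter", "dopamine"], "Neurobiology of Addiction"),
    (2, ["reward", "circuit", "pleasure", "surge"], "Brain Reward Pathways"),
    (3, ["term", "language", "negative", "stigma"], "Person-First Language & Terminology"),
    (4, ["risk", "factor", "trauma", "childhood"], "Risk Factors & Development"),
    (5, ["stage", "continuum", "harmful", "problem"], "Substance Use Continuum & Stages"),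
    (6, ["treatment", "recovery", "therapy", "counseling"], "Treatment & Recovery Approaches") ]

def pvChain (ws : List String) : List (Int × List String × String) → Option (Int × String)
  | [] => none
  | r :: rest => if ws.any (fun w => r.2.1.contains w) then some (r.1, r.2.2) else pvChain ws rest

-- left-biased min by priority
def pvMinOpt (a b : Option (Int × String)) : Option (Int × String) :=
  match a, b with
  | none, b => b
  | some x, none => some x
  | some x, some y => if y.1 < x.1 then some y else some x

theorem pvMinOpt_none_right (a : Option (Int × String)) : pvMinOpt a none = a := by
  cases a <;> rfl

theorem pvMinOpt_assoc (a b c : Option (Int × String)) :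
    pvMinOpt (pvMinOpt a b) c = pvMinOpt a (pvMinOpt b c) := by
  cases a <;> cases b <;> cases c <;> simp only [pvMinOpt] <;> (try split_ifs) <;>
    (try simp only [pvMinOpt]) <;> (try split_ifs) <;>
    first | rfl | omega | (exfalso; omega)

theorem pvBestStep_eq (best : Option (Int × String)) (w : String) :
    pvBestStep best w = pvMinOpt best (pvKeywordIndex.get? w) := by
  cases hg : pvKeywordIndex.get? w <;> cases best <;> simp [pvBestStep, pvMinOpt, hg]

-- the dict lookup is the first rule containing the word (keywords are distinct across rules)
def pvFlat (rs : List (Int × List String × String)) : List (String × (Int × String)) :=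
  rs.flatMap (fun r => r.2.1.map (fun k => (k, (r.1, r.2.2))))

theorem pvGet_group (v : Int × String) (ks : List String) (tail : List (String × (Int × String)))
    (w : String) :
    (PySem.Dict.mk (ks.map (fun k => (k, v)) ++ tail)).get? w
      = if ks.contains w then some v else (PySem.Dict.mk tail).get? w := by
  induction ks with
  | nil => simp
  | cons k ks ih =>
    by_cases h : k = w
    · subst h
      simp [PySem.Dict.get?_mk_cons, List.contains_cons]
    · simp [PySem.Dict.get?_mk_cons, List.contains_cons, ih, h, Ne.symm h]

theorem pvGet_flat (rs : List (Int × List String × String)) (w : String) :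
    (PySem.Dict.mk (pvFlat rs)).get? w = pvChain [w] rs := by
  induction rs with
  | nil => rfl
  | cons r rest ih =>
    rw [show pvFlat (r :: rest) = r.2.1.map (fun k => (k, (r.1, r.2.2))) ++ pvFlat rest from rfl,
      pvGet_group]
    have hc : ([w].any fun x => r.2.1.contains x) = r.2.1.contains w := by simp
    rw [show pvChain [w] (r :: rest)
        = if [w].any (fun x => r.2.1.contains x) then some (r.1, r.2.2) else pvChain [w] rest
      from rfl, hc, ih]

set_option maxHeartbeats 1000000 in
theorem pvIdx_eq (w : String) : pvKeywordIndex.get? w = pvChain [w] pvRulesIdx := by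
  have hK : pvKeywordIndex = PySem.Dict.mk (pvFlat pvRulesIdx) := by decide
  rw [hK, pvGet_flat]

theorem pvChain_mem {ws : List String} {rs : List (Int × List String × String)} {p : Int × String}
    (h : pvChain ws rs = some p) : ∃ r ∈ rs, p = (r.1, r.2.2) := by
  induction rs with
  | nil => simp [pvChain] at h
  | cons r rest ih =>
    rw [show pvChain ws (r :: rest)
        = if ws.any (fun w => r.2.1.contains w) then some (r.1, r.2.2) else pvChain ws rest
      from rfl] at h
    split_ifs at h with hc
    · exact ⟨r, by simp, (Option.some_inj.mp h).symm⟩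
    · obtain ⟨r', hr', hp⟩ := ih h
      exact ⟨r', by simp [hr'], hp⟩

theorem pvChain_cons (rs : List (Int × List String × String))
    (hs : List.Pairwise (fun a b => a.1 < b.1) rs) (w : String) (ws : List String) :
    pvChain (w :: ws) rs = pvMinOpt (pvChain [w] rs) (pvChain ws rs) := by
  induction rs with
  | nil => rfl
  | cons r rest ih =>
    have hs' := (List.pairwise_cons.mp hs).2
    have hlb := (List.pairwise_cons.mp hs).1
    have hunf : ∀ (vs : List String), pvChain vs (r :: rest)
        = if vs.any (fun x => r.2.1.contains x) then some (r.1, r.2.2) else pvChain vs rest :=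
      fun _ => rfl
    by_cases h1 : w ∈ r.2.1
    · have hW : ([w].any fun x => r.2.1.contains x) = true := by simp [h1]
      have hA : ((w :: ws).any fun x => r.2.1.contains x) = true := by simp [h1]
      rw [hunf (w :: ws), if_pos hA, hunf [w], if_pos hW]
      by_cases h2 : (ws.any fun x => r.2.1.contains x) = true
      · rw [hunf ws, if_pos h2]; simp [pvMinOpt]
      · rw [hunf ws, if_neg h2]
        cases hrest : pvChain ws rest with
        | none => rfl
        | some p =>
          obtain ⟨r', hr', hp⟩ := pvChain_mem hrest
          have hlt : r.1 < p.1 := by rw [hp]; exact hlb r' hr'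
          simp [pvMinOpt, if_neg (by omega : ¬ p.1 < r.1)]
    · have hW : ¬ (([w].any fun x => r.2.1.contains x) = true) := by simp [h1]
      by_cases h2 : (ws.any fun x => r.2.1.contains x) = true
      · have hA : ((w :: ws).any fun x => r.2.1.contains x) = true := by
          simp only [List.any_cons, Bool.or_eq_true]; right; exact h2
        rw [hunf (w :: ws), if_pos hA, hunf [w], if_neg hW, hunf ws, if_pos h2]
        cases hrest : pvChain [w] rest with
        | none => rfl
        | some p =>
          obtain ⟨r', hr', hp⟩ := pvChain_mem hrest
          have hlt : r.1 < p.1 := by rw [hp]; exact hlb r' hr'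
          simp [pvMinOpt, if_pos (by omega : r.1 < p.1)]
      · have hA : ¬ (((w :: ws).any fun x => r.2.1.contains x) = true) := by
          simp only [List.any_cons, Bool.or_eq_true]
          rintro (hc | hr2)
          · exact h1 (by simpa using hc)
          · exact h2 hr2
        rw [hunf (w :: ws), if_neg hA, hunf [w], if_neg hW, hunf ws, if_neg h2]
        exact ih hs' 

theorem pvFold_eq (ws : List String) (acc : Option (Int × String)) :
    ws.foldl pvBestStep acc = pvMinOpt acc (pvChain ws pvRulesIdx) := by
  induction ws generalizing acc with
  | nil => rw [show pvChain [] pvRulesIdx = none from by decide, pvMinOpt_none_right]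
           rfl
  | cons w ws ih =>
    have hsorted : List.Pairwise (fun a b : Int × List String × String => a.1 < b.1) pvRulesIdx := by
      decide
    rw [List.foldl_cons, ih, pvBestStep_eq, pvIdx_eq, pvMinOpt_assoc,
      ← pvChain_cons pvRulesIdx hsorted]

-- per-cluster: A's elif chain equals B's min-hit rendering
theorem pvTitle_eq (ws : List String) :
    (if ws.any (fun word => (["substance", "addiction", "disorder", "use"] : List String).contains word) then
      "Substance Use Terminology & Concepts"
    else if ws.any (fun word => (["brain", "neuron", "neurotransmitter", "dopamine"] : List String).contains word) then
      "Neurobiology of Addiction"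
    else if ws.any (fun word => (["reward", "circuit", "pleasure", "surge"] : List String).contains word) then
      "Brain Reward Pathways"
    else if ws.any (fun word => (["term", "language", "negative", "stigma"] : List String).contains word) then
      "Person-First Language & Terminology"
    else if ws.any (fun word => (["risk", "factor", "trauma", "childhood"] : List String).contains word) then
      "Risk Factors & Development"
    else if ws.any (fun word => (["stage", "continuum", "harmful", "problem"] : List String).contains word) then
      "Substance Use Continuum & Stages"
    else if ws.any (fun word => (["treatment", "recovery", "therapy", "counseling"] : List String).contains word) then
      "Treatment & Recovery Approaches"
    else
      "Topic: " ++ PySem.Str.join ", " (ws.take 3)) =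
    (match ws.foldl pvBestStep none with
     | some best => best.2
     | none => "Topic: " ++ PySem.Str.join ", " (ws.take 3)) := by
  rw [pvFold_eq]
  simp only [pvMinOpt, pvRulesIdx, pvChain]
  split_ifs <;> rfl

-- ===== VERDICT (by name: the statement is the Claim_ definition above) =====
theorem assign_cluster_titles_spec : Claim_equal_assign_cluster_titles := by
  intro ck _
  unfold Spec_assign_cluster_titles assign_cluster_titles assign_cluster_titles_alt
  congr 2
  funext d kv
  simp only [pvTitle_eq]
  cases ((kv.2.take 4).map Prod.fst).foldl pvBestStep none <;> rfl
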